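-- pv_equiv track=rewrite | github.com/ValerieMauduit/AoC2024 | all_days/day19.py | recompose
-- ===== SOURCE A (Python) =====
-- def recompose(splitted_pattern, towel):
--     joined_towel = '-' + ''.join(towel.split('-')) + '-'
--     count = len(splitted_pattern) - 1
--     patterns = [splitted_pattern]
--     for n in range(count):
--         patterns = (
--                 [p[:(2 * n + 1)] + [towel] + p[(2 * n + 1):] for p in patterns]
--                 + [p[:(2 * n + 1)] + [joined_towel] + p[(2 * n + 1):] for p in patterns]
--         )
--     return [''.join(p) for p in patterns]
-- ===== SOURCE B (Python) =====
-- def recompose(splitted_pattern, towel):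
--     joined_towel = '-' + ''.join(towel.split('-')) + '-'
--     if len(splitted_pattern) < 2:
--         return [''.join(splitted_pattern)]
--     head, tail = splitted_pattern[0], splitted_pattern[1:]
--     result = []
--     for i in range(2 ** len(tail)):
--         s = head
--         k = i
--         for part in tail:
--             s += (joined_towel if k % 2 else towel) + part
--             k //= 2
--         result.append(s)
--     return result
-- ===== Notes on version B (the rewrite author's own statement) =====
-- stated objective: alternative
-- what changed: Instead of iteratively doubling a list of token lists by slicing and re-inserting at position 2n+1 (then joining at the end), B enumerates the 2^gaps choice vectors directly by index, decoding each index's bits low-first with %2 and //2 while concatenating head, token and part in one pass per output string.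
import Mathlib
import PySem

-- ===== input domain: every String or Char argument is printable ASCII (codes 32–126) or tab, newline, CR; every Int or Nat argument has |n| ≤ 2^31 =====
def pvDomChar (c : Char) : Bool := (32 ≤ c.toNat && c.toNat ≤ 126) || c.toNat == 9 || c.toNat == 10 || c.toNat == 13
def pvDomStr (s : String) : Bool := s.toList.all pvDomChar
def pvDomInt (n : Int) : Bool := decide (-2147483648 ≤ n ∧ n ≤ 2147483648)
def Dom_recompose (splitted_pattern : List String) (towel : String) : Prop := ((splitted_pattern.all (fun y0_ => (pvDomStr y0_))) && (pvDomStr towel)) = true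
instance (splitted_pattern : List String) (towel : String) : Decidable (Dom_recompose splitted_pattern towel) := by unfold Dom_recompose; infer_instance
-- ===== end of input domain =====

-- B replaces A's iterative doubling of token-lists (slice + insert at 2n+1, join at the end) by a direct
-- enumeration of the 2^gaps choice indices, decoding each index's bits low-first while concatenating one
-- output string per index (objective: alternative decomposition, same asymptotic cost).

-- ===== PORT A =====
def recompose (splitted_pattern : List String) (towel : String) : List String :=
  let joined_towel : String := "-" ++ PySem.Str.join "" ((PySem.Str.split? towel "-").getD []) ++ "-"
  let count : Int := (splitted_pattern.length : Int) - 1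
  let patterns : List (List String) :=
    (PySem.List.pyRange 0 count 1).foldl
      (fun pats n =>
        pats.map (fun p =>
          PySem.List.slice p none (some (2 * n + 1)) ++ [towel] ++ PySem.List.slice p (some (2 * n + 1)) none)
        ++ pats.map (fun p =>
          PySem.List.slice p none (some (2 * n + 1)) ++ [joined_towel] ++ PySem.List.slice p (some (2 * n + 1)) none))
      [splitted_pattern]
  patterns.map (fun p => PySem.Str.join "" p)

-- ===== PORT B =====
def recompose_alt (splitted_pattern : List String) (towel : String) : List String :=
  let joined_towel : String := "-" ++ PySem.Str.join "" ((PySem.Str.split? towel "-").getD []) ++ "-"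
  if splitted_pattern.length < 2 then [PySem.Str.join "" splitted_pattern]
  else
    match splitted_pattern with
    | [] => []
    | head :: tail =>
      (PySem.List.pyRange 0 ((2 : Int) ^ tail.length) 1).map (fun i =>
        (tail.foldl
          (fun (st : String × Int) part =>
            (st.1 ++ (if PySem.Int.mod st.2 2 ≠ 0 then joined_towel else towel) ++ part,
             PySem.Int.floordiv st.2 2))
          (head, i)).1)

-- ===== PRECONDITION & SPEC =====
def Spec_recompose (splitted_pattern : List String) (towel : String) (out : List String) : Prop := out = recompose_alt splitted_pattern towel
instance (splitted_pattern : List String) (towel : String) (out : List String) : Decidable (Spec_recompose splitted_pattern towel out) := by unfold Spec_recompose; infer_instance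

-- ===== CLAIM (what is proved, stated in full; the proofs are below) =====
def Claim_equal_recompose : Prop := ∀ (splitted_pattern : List String) (towel : String), Dom_recompose splitted_pattern towel → Spec_recompose splitted_pattern towel (recompose splitted_pattern towel)

-- ===== LEMMAS AND PROOFS =====

-- the token chosen for one gap, from the parity of the (already shifted) choice index
def tokOf (j t : String) (b : Nat) : String := if b % 2 = 1 then j else t

-- the list of tokens for the first n gaps, decoded from choice index i, low bit first
def toksN (j t : String) : Nat → Nat → List String
  | 0, _ => []
  | n + 1, i => tokOf j t i :: toksN j t n (i / 2)

-- interleave parts with tokens: weave [p0,p1,...] [t0,...,t(k-1)] = [p0,t0,p1,t1,...,t(k-1),pk,...]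
def weave : List String → List String → List String
  | ps, [] => ps
  | [], _ :: _ => []
  | p :: ps, t :: ts => p :: t :: weave ps ts

-- interleave tokens with parts, token first (equal lengths)
def itp : List String → List String → List String
  | t :: ts, p :: ps => t :: p :: itp ts ps
  | _, _ => []

theorem chars_join_nil_cons (x : List Char) (xs : List (List Char)) :
    PySem.Chars.join [] (x :: xs) = x ++ PySem.Chars.join [] xs := by
  cases xs <;> simp [PySem.Chars.join, List.intercalate, List.intersperse]

theorem join_empty_cons (x : String) (xs : List String) :
    PySem.Str.join "" (x :: xs) = x ++ PySem.Str.join "" xs := by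
  apply String.toList_inj.mp
  simp [PySem.Str.join, chars_join_nil_cons]

theorem join_empty_nil : PySem.Str.join "" ([] : List String) = "" := by
  apply String.toList_inj.mp
  simp [PySem.Str.join, PySem.Chars.join, List.intercalate]

theorem weave_nil (ps : List String) : weave ps [] = ps := by
  cases ps <;> rfl

theorem toksN_length (j t : String) (n i : Nat) : (toksN j t n i).length = n := by
  induction n generalizing i with
  | zero => simp [toksN]
  | succ n ih => simp [toksN, ih]

theorem toksN_split (j t : String) (n i : Nat) :
    toksN j t (n + 1) i = toksN j t n (i % 2 ^ n) ++ [tokOf j t (i / 2 ^ n)] := by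
  induction n generalizing i with
  | zero => simp [toksN]
  | succ n ih =>
    have h1 : tokOf j t i = tokOf j t (i % 2 ^ (n + 1)) := by
      unfold tokOf
      rw [Nat.mod_mod_of_dvd i (dvd_pow_self 2 (Nat.succ_ne_zero n))]
    have h2 : i / 2 % 2 ^ n = i % 2 ^ (n + 1) / 2 := by
      rw [pow_succ, mul_comm, Nat.mod_mul_right_div_self]
    have h3 : i / 2 / 2 ^ n = i / 2 ^ (n + 1) := by
      rw [Nat.div_div_eq_div_mul, pow_succ, mul_comm]
    show tokOf j t i :: toksN j t (n + 1) (i / 2) = _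
    rw [ih, h1, h2, h3]
    rfl

theorem weave_insert (x : String) :
    ∀ (ts sp : List String), ts.length + 2 ≤ sp.length →
      (weave sp ts).take (2 * ts.length + 1) ++ x :: (weave sp ts).drop (2 * ts.length + 1)
        = weave sp (ts ++ [x]) := by
  intro ts
  induction ts with
  | nil =>
    intro sp hlen
    match sp, hlen with
    | p0 :: p1 :: r, _ => rfl
  | cons u ts' ih =>
    intro sp hlen
    match sp, hlen with
    | p :: ps, hlen =>
      have hps : ts'.length + 2 ≤ ps.length := by
        simp at hlen; omega
      have harith : 2 * (u :: ts').length + 1 = (2 * ts'.length + 1) + 2 := by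
        simp; omega
      simp only [weave, harith, List.take_succ_cons, List.drop_succ_cons, List.cons_append]
      rw [← ih ps hps]

theorem weave_cons_itp (h : String) :
    ∀ (t ts : List String), ts.length = t.length → weave (h :: t) ts = h :: itp ts t := by
  intro t
  induction t generalizing h with
  | nil =>
    intro ts hlen
    match ts, hlen with
    | [], _ => simp [weave, itp]
  | cons p t' ih =>
    intro ts hlen
    match ts, hlen with
    | u :: ts', hlen =>
      have : ts'.length = t'.length := by simpa using hlen
      simp only [weave, itp]
      rw [ih p ts' this]

theorem tok_cast (j t : String) (i : Nat) :
    (if PySem.Int.mod (i : Int) 2 ≠ 0 then j else t) = tokOf j t i := by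
  have hm : PySem.Int.mod (i : Int) 2 = ((i % 2 : Nat) : Int) := by
    exact_mod_cast PySem.Int.mod_natCast i 2
  rw [hm]
  simp only [tokOf]
  by_cases h : i % 2 = 1
  · simp [h]
  · have h0 : i % 2 = 0 := by omega
    simp [h0]

theorem foldB (j t0 : String) :
    ∀ (t : List String) (s : String) (i : Nat),
      (t.foldl
        (fun (st : String × Int) part =>
          (st.1 ++ (if PySem.Int.mod st.2 2 ≠ 0 then j else t0) ++ part,
           PySem.Int.floordiv st.2 2))
        (s, (i : Int))).1
      = s ++ PySem.Str.join "" (itp (toksN j t0 t.length i) t) := by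
  intro t
  induction t with
  | nil => intro s i; simp [toksN, itp, join_empty_nil]
  | cons p t' ih =>
    intro s i
    have hfd : PySem.Int.floordiv (i : Int) 2 = ((i / 2 : Nat) : Int) := by
      exact_mod_cast PySem.Int.floordiv_natCast i 2
    simp only [List.foldl_cons, tok_cast, hfd, ih]
    simp [toksN, itp, join_empty_cons, String.append_assoc]

theorem A_loop (towel joined : String) (sp : List String) :
    ∀ n : Nat, n + 1 ≤ sp.length →
      (PySem.List.pyRange 0 (n : Int) 1).foldl
        (fun pats m =>
          pats.map (fun p =>
            PySem.List.slice p none (some (2 * m + 1)) ++ [towel] ++ PySem.List.slice p (some (2 * m + 1)) none)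
          ++ pats.map (fun p =>
            PySem.List.slice p none (some (2 * m + 1)) ++ [joined] ++ PySem.List.slice p (some (2 * m + 1)) none))
        [sp]
      = (List.range (2 ^ n)).map (fun i => weave sp (toksN joined towel n i)) := by
  intro n
  induction n with
  | zero =>
    intro _
    rw [Nat.cast_zero, PySem.List.pyRange_one_eq_nil le_rfl]
    simp [toksN, weave_nil]
  | succ n ih =>
    intro hlen
    have hcast : ((n + 1 : Nat) : Int) = (n : Int) + 1 := by push_cast; ring
    rw [hcast, PySem.List.pyRange_one_succ_right (by positivity), List.foldl_append,
        ih (by omega)]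
    have hins : ∀ (x : String) (i : Nat),
        PySem.List.slice (weave sp (toksN joined towel n i)) none (some (2 * (n : Int) + 1))
          ++ [x]
          ++ PySem.List.slice (weave sp (toksN joined towel n i)) (some (2 * (n : Int) + 1)) none
        = weave sp (toksN joined towel n i ++ [x]) := by
      intro x i
      have hc : (2 * (n : Int) + 1) = ((2 * n + 1 : Nat) : Int) := by push_cast; ring
      rw [hc, PySem.List.slice_to_natCast, PySem.List.slice_from_natCast]
      have hw := weave_insert x (toksN joined towel n i) sp
        (by rw [toksN_length]; omega)
      rw [toksN_length] at hw
      simpa using hw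
    have hsplit : List.range (2 ^ (n + 1))
        = List.range (2 ^ n) ++ (List.range (2 ^ n)).map (fun k => 2 ^ n + k) := by
      rw [pow_succ, mul_two, List.range_add]
    rw [hsplit, List.map_append, List.map_map]
    simp only [List.foldl_cons, List.foldl_nil, List.map_map]
    congr 1
    · apply List.map_congr_left
      intro i hi
      have hi' : i < 2 ^ n := List.mem_range.mp hi
      simp only [Function.comp]
      rw [hins towel i, toksN_split, Nat.mod_eq_of_lt hi', Nat.div_eq_of_lt hi']
      simp [tokOf]
    · apply List.map_congr_left
      intro i hi
      have hi' : i < 2 ^ n := List.mem_range.mp hi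
      simp only [Function.comp]
      rw [hins joined i, toksN_split]
      have hm : (2 ^ n + i) % 2 ^ n = i := by
        rw [Nat.add_mod_left, Nat.mod_eq_of_lt hi']
      have hd : (2 ^ n + i) / 2 ^ n = 1 := by
        rw [Nat.add_comm, Nat.add_div_right _ (Nat.two_pow_pos n), Nat.div_eq_of_lt hi']
      rw [hm, hd]
      simp [tokOf]

-- ===== VERDICT (by name: the statement is the Claim_ definition above) =====
theorem recompose_spec : Claim_equal_recompose := by
  intro sp towel _
  unfold Spec_recompose
  match sp with
  | [] => rfl
  | [h] => rfl
  | h :: p :: r =>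
    simp only [recompose, recompose_alt, List.length_cons]
    rw [if_neg (by omega)]
    have hcount : ((r.length + 1 + 1 : Nat) : Int) - 1 = ((r.length + 1 : Nat) : Int) := by
      push_cast; ring
    rw [hcount, A_loop towel ("-" ++ PySem.Str.join "" ((PySem.Str.split? towel "-").getD []) ++ "-")
          (h :: p :: r) (r.length + 1) (by simp)]
    have hpow : ((2 : Int) ^ (r.length + 1)) = ((2 ^ (r.length + 1) : Nat) : Int) := by
      push_cast; ring
    rw [hpow, PySem.List.pyRange_zero_natCast, List.map_map, List.map_map]
    apply List.map_congr_left
    intro i _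
    simp only [Function.comp]
    rw [foldB]
    have hl : (toksN ("-" ++ PySem.Str.join "" ((PySem.Str.split? towel "-").getD []) ++ "-") towel
        (r.length + 1) i).length = (p :: r).length := by
      rw [toksN_length]; rfl
    rw [weave_cons_itp h (p :: r) _ hl, join_empty_cons]
    rfl
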